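-- pv_equiv track=rewrite | github.com/mikefeneley/topcoder | src/SRM-679/listening_songs.py | listen
-- ===== SOURCE A (Python) =====
-- def listen(durations1, durations2, minutes, T):
--     durations1 = list(durations1)
--     durations2 = list(durations2)
--
--     seconds = minutes * 60
--     songs = 0
--     for i in range(0, T):
--
--
--         if len(durations1) <= 0 or len(durations2) <= 0:
--             return -1
--
--         first = min(durations1)
--         second = min(durations2)
--         seconds = seconds - first - second
--
--         if seconds < 0:
--             return -1
--
--         durations1.remove(first)
--         durations2.remove(second)
--         songs += 2
--
--     comb = durations1 + durations2
--
--     while len(comb) > 0 and seconds > 0: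
--         song = min(comb)
--         seconds -= song
--
--         if(seconds == 0):
--             return songs + 1
--         elif(seconds < 0):
--             return songs
--         else:
--             songs += 1
--         comb.remove(song)
--     return -1
-- ===== SOURCE B (Python) =====
-- def listen(durations1, durations2, minutes, T):
--     d1 = sorted(durations1)
--     d2 = sorted(durations2)
--     k = T if T > 0 else 0
--     if k > len(d1) or k > len(d2):
--         return -1
--     seconds = minutes * 60
--     for a, b in zip(d1[:k], d2[:k]):
--         seconds -= a + b
--         if seconds < 0:
--             return -1
--     songs = 2 * k
--     for song in merge(d1[k:], d2[k:]):
--         if seconds <= 0: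
--             break
--         seconds -= song
--         if seconds == 0:
--             return songs + 1
--         if seconds < 0:
--             return songs
--         songs += 1
--     return -1
--
--
-- def merge(xs, ys):
--     out = []
--     i = j = 0
--     while i < len(xs) and j < len(ys):
--         if xs[i] <= ys[j]:
--             out.append(xs[i])
--             i += 1
--         else:
--             out.append(ys[j])
--             j += 1
--     out.extend(xs[i:])
--     out.extend(ys[j:])
--     return out
-- ===== Notes on version B (the rewrite author's own statement) =====
-- stated objective: faster
-- what changed: B sorts both lists once and walks the sorted prefixes, then merges the two sorted tails with a two-pointer merge and consumes them in order, instead of A's repeated min()+remove() scans over shrinking lists.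
import Mathlib
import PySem

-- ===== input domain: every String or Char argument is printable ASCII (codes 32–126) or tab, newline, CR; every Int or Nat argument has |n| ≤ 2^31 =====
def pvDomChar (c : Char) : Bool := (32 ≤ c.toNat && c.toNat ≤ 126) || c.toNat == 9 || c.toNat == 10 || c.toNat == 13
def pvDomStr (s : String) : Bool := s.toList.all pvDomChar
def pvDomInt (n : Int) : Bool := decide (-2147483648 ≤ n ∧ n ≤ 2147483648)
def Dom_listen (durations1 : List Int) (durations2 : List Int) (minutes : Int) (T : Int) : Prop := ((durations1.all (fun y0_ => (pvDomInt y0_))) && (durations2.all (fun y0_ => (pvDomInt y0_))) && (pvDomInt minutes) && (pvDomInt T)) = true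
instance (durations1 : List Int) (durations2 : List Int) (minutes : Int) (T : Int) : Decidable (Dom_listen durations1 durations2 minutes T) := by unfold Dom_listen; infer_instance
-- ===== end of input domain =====

-- B replaces A's repeated min()+remove() scans by sorting once and walking the
-- sorted prefixes/merged tails; measured faster (asymptotic: O(n log n) vs O(T*n + n^2)).

-- ===== PORT A =====
-- A's `for i in range(0, T)` loop: each step takes min of both lists, subtracts,
-- removes; `.error r` models an early `return r`.  The `none` match arms are
-- unreachable (min/remove of a nonempty list never fail in Python).
def listenLoop1 : Nat → List Int → List Int → Int → Int → Except Int (List Int × List Int × Int × Int)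
  | 0, d1, d2, seconds, songs => .ok (d1, d2, seconds, songs)
  | n+1, d1, d2, seconds, songs =>
    if d1.length ≤ 0 ∨ d2.length ≤ 0 then .error (-1)
    else
      match PySem.List.min? d1 (fun x => x), PySem.List.min? d2 (fun x => x) with
      | some first, some second =>
        let seconds' := seconds - first - second
        if seconds' < 0 then .error (-1)
        else
          match PySem.List.remove? d1 first, PySem.List.remove? d2 second with
          | some d1', some d2' => listenLoop1 n d1' d2' seconds' (songs + 2)
          | _, _ => .error (-1)   -- unreachable
      | _, _ => .error (-1)       -- unreachable

-- A's `while len(comb) > 0 and seconds > 0` loop; fuel = comb.length (each pass removes one element).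
def listenLoop2 : Nat → List Int → Int → Int → Int
  | 0, _, _, _ => -1
  | n+1, comb, seconds, songs =>
    if comb.length > 0 ∧ seconds > 0 then
      match PySem.List.min? comb (fun x => x) with
      | some song =>
        let seconds' := seconds - song
        if seconds' = 0 then songs + 1
        else if seconds' < 0 then songs
        else
          match PySem.List.remove? comb song with
          | some comb' => listenLoop2 n comb' seconds' (songs + 1)
          | none => -1            -- unreachable
      | none => -1                -- unreachable
    else -1

def listen (durations1 : List Int) (durations2 : List Int) (minutes : Int) (T : Int) : Int :=
  match listenLoop1 T.toNat durations1 durations2 (minutes * 60) 0 with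
  | .error r => r
  | .ok (d1, d2, seconds, songs) =>
    let comb := d1 ++ d2
    listenLoop2 comb.length comb seconds songs

-- ===== PORT B =====
-- Source B's `merge` two-pointer merge of two lists.
def mergeB : List Int → List Int → List Int
  | [], ys => ys
  | x :: xs, [] => x :: xs
  | x :: xs, y :: ys =>
    if x ≤ y then x :: mergeB xs (y :: ys) else y :: mergeB (x :: xs) ys

-- Source B's first for-loop over zip(d1[:k], d2[:k]).
def altLoop1 : List (Int × Int) → Int → Except Int Int
  | [], seconds => .ok seconds
  | (a, b) :: rest, seconds =>
    let seconds' := seconds - (a + b)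
    if seconds' < 0 then .error (-1) else altLoop1 rest seconds'

-- Source B's second for-loop over the merged tails.
def altLoop2 : List Int → Int → Int → Int
  | [], _, _ => -1
  | song :: rest, seconds, songs =>
    if seconds ≤ 0 then -1
    else
      let seconds' := seconds - song
      if seconds' = 0 then songs + 1
      else if seconds' < 0 then songs
      else altLoop2 rest seconds' (songs + 1)

def listen_alt (durations1 : List Int) (durations2 : List Int) (minutes : Int) (T : Int) : Int :=
  let d1 := PySem.List.sorted durations1 (fun x => x)
  let d2 := PySem.List.sorted durations2 (fun x => x)
  let k : Nat := (if T > 0 then T else 0).toNat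
  if k > d1.length ∨ k > d2.length then -1
  else
    match altLoop1 ((d1.take k).zip (d2.take k)) (minutes * 60) with
    | .error r => r
    | .ok seconds => altLoop2 (mergeB (d1.drop k) (d2.drop k)) seconds (2 * (k : Int))

-- ===== PRECONDITION & SPEC =====
def Spec_listen (durations1 : List Int) (durations2 : List Int) (minutes : Int) (T : Int) (out : Int) : Prop := out = listen_alt durations1 durations2 minutes T
instance (durations1 : List Int) (durations2 : List Int) (minutes : Int) (T : Int) (out : Int) : Decidable (Spec_listen durations1 durations2 minutes T out) := by unfold Spec_listen; infer_instance

-- ===== CLAIM (what is proved, stated in full; the proofs are below) =====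
def Claim_equal_listen : Prop := ∀ (durations1 : List Int) (durations2 : List Int) (minutes : Int) (T : Int), Dom_listen durations1 durations2 minutes T → Spec_listen durations1 durations2 minutes T (listen durations1 durations2 minutes T)

-- ===== LEMMAS AND PROOFS =====

-- min? of any permutation of a sorted nonempty list is its head.
theorem min?_of_perm_sorted (l : List Int) (x : Int) (s : List Int)
    (hp : l.Perm (x :: s)) (hs : (x :: s).Pairwise (· ≤ ·)) :
    PySem.List.min? l (fun y => y) = some x := by
  have hne : l ≠ [] := by
    intro h; subst h; exact (List.cons_ne_nil x s) hp.nil_eq.symm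
  obtain ⟨m, hm⟩ : ∃ m, PySem.List.min? l (fun y => y) = some m := by
    cases h : PySem.List.min? l (fun y => y) with
    | none => exact absurd ((PySem.List.min?_eq_none_iff _ _).mp h) hne
    | some m => exact ⟨m, rfl⟩
  have hmem : m ∈ l := PySem.List.min?_mem hm
  have hmem' : m ∈ (x :: s) := hp.mem_iff.mp hmem
  have hxl : x ∈ l := hp.mem_iff.mpr (List.mem_cons_self)
  have h1 : m ≤ x := PySem.List.min?_isMin hm x hxl
  have h2 : x ≤ m := by
    rcases List.mem_cons.mp hmem' with h | h
    · omega
    · exact List.rel_of_pairwise_cons hs h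
  rw [hm]; congr 1; omega

theorem merge_perm (xs ys : List Int) : (mergeB xs ys).Perm (xs ++ ys) := by
  induction xs generalizing ys with
  | nil => simp [mergeB]
  | cons x xs ih =>
    induction ys with
    | nil => simp [mergeB]
    | cons y ys ihy =>
      simp only [mergeB]
      split
      · exact (ih (y :: ys)).cons x
      · refine ((ihy).cons y).trans ?_
        exact (List.perm_middle (a := y) (l₁ := x :: xs) (l₂ := ys)).symm

theorem merge_pairwise (xs ys : List Int)
    (hx : xs.Pairwise (· ≤ ·)) (hy : ys.Pairwise (· ≤ ·)) :
    (mergeB xs ys).Pairwise (· ≤ ·) := by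
  induction xs generalizing ys with
  | nil => simpa [mergeB] using hy
  | cons x xs ih =>
    induction ys with
    | nil => simpa [mergeB] using hx
    | cons y ys ihy =>
      simp only [mergeB]
      split
      · rename_i hxy
        refine List.pairwise_cons.mpr ⟨?_, ih (y :: ys) (List.pairwise_cons.mp hx).2 hy⟩
        intro a ha
        have := (merge_perm xs (y :: ys)).mem_iff.mp ha
        rcases List.mem_append.mp this with h | h
        · exact (List.pairwise_cons.mp hx).1 a h
        · rcases List.mem_cons.mp h with h | h
          · omega
          · have := List.rel_of_pairwise_cons hy h; omega
      · rename_i hxy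
        refine List.pairwise_cons.mpr ⟨?_, ihy (List.pairwise_cons.mp hy).2⟩
        intro a ha
        have := (merge_perm (x :: xs) ys).mem_iff.mp ha
        rcases List.mem_append.mp this with h | h
        · rcases List.mem_cons.mp h with h | h
          · omega
          · have := List.rel_of_pairwise_cons hx h; omega
        · exact List.rel_of_pairwise_cons hy h

-- Phase 2: A's min+remove loop over any permutation of a sorted list s equals B's walk of s.
theorem loop2_eq (s : List Int) : ∀ (comb : List Int) (seconds songs : Int),
    comb.Perm s → s.Pairwise (· ≤ ·) →
    listenLoop2 comb.length comb seconds songs = altLoop2 s seconds songs := by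
  induction s with
  | nil =>
    intro comb seconds songs hp _
    have : comb = [] := hp.eq_nil
    subst this
    simp [listenLoop2, altLoop2]
  | cons x s ih =>
    intro comb seconds songs hp hs
    have hlen : comb.length = s.length + 1 := by simpa using hp.length_eq
    rw [hlen]
    simp only [listenLoop2, altLoop2]
    by_cases hsec : seconds ≤ 0
    · have h1 : ¬ (comb.length > 0 ∧ seconds > 0) := by omega
      simp [h1, hsec]
    · have h1 : comb.length > 0 ∧ seconds > 0 := by omega
      have hxmem : x ∈ comb := hp.mem_iff.mpr List.mem_cons_self
      rw [if_pos h1, if_neg hsec]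
      simp only [min?_of_perm_sorted comb x s hp hs,
        PySem.List.remove?_eq_some_erase comb x hxmem]
      by_cases h0 : seconds - x = 0
      · simp [h0]
      · by_cases hneg : seconds - x < 0
        · simp [h0, hneg]
        · simp only [if_neg h0, if_neg hneg]
          have hperm : (comb.erase x).Perm s :=
            (List.Perm.erase x hp).trans (by simp)
          have hlen' : (comb.erase x).length = s.length := by
            simpa using hperm.length_eq
          rw [← hlen']
          exact ih (comb.erase x) (seconds - x) (songs + 1) hperm (List.pairwise_cons.mp hs).2

-- Phase 1 + finish: A's whole computation equals B's, for lists that are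
-- permutations of sorted lists s1, s2.
theorem loop1_eq : ∀ (k : Nat) (d1 d2 s1 s2 : List Int) (seconds songs : Int),
    d1.Perm s1 → d2.Perm s2 → s1.Pairwise (· ≤ ·) → s2.Pairwise (· ≤ ·) →
    (match listenLoop1 k d1 d2 seconds songs with
     | .error r => r
     | .ok (a, b, sec, sg) => listenLoop2 (a ++ b).length (a ++ b) sec sg)
    =
    (if k > s1.length ∨ k > s2.length then -1
     else
       match altLoop1 ((s1.take k).zip (s2.take k)) seconds with
       | .error r => r
       | .ok sec => altLoop2 (mergeB (s1.drop k) (s2.drop k)) sec (songs + 2 * (k : Int))) := by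
  intro k
  induction k with
  | zero =>
    intro d1 d2 s1 s2 seconds songs hp1 hp2 hs1 hs2
    simp only [listenLoop1, List.take_zero, List.zip_nil_left, altLoop1, List.drop_zero]
    rw [if_neg (by omega)]
    have hz : songs + 2 * ((0 : Nat) : Int) = songs := by simp
    rw [hz]
    exact loop2_eq (mergeB s1 s2) (d1 ++ d2) seconds songs
      ((hp1.append hp2).trans (merge_perm s1 s2).symm)
      (merge_pairwise s1 s2 hs1 hs2)
  | succ k ih =>
    intro d1 d2 s1 s2 seconds songs hp1 hp2 hs1 hs2
    have hl1 : d1.length = s1.length := hp1.length_eq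
    have hl2 : d2.length = s2.length := hp2.length_eq
    simp only [listenLoop1]
    by_cases hemp : d1.length ≤ 0 ∨ d2.length ≤ 0
    · rw [if_pos hemp, if_pos (by omega)]
    · rw [if_neg hemp]
      rw [not_or] at hemp
      cases s1 with
      | nil => exfalso; have h := hp1.eq_nil; subst h; simp at hemp
      | cons x s1' =>
        cases s2 with
        | nil => exfalso; have h := hp2.eq_nil; subst h; simp at hemp
        | cons y s2' =>
          have hx1 : x ∈ d1 := hp1.mem_iff.mpr List.mem_cons_self
          have hy2 : y ∈ d2 := hp2.mem_iff.mpr List.mem_cons_self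
          simp only [min?_of_perm_sorted d1 x s1' hp1 hs1,
            min?_of_perm_sorted d2 y s2' hp2 hs2,
            List.take_succ_cons, List.zip_cons_cons, List.drop_succ_cons, altLoop1]
          have hxy : seconds - (x + y) = seconds - x - y := by ring
          rw [hxy]
          by_cases hneg : seconds - x - y < 0
          · rw [if_pos hneg, if_pos hneg]
            split_ifs <;> rfl
          · rw [if_neg hneg, if_neg hneg]
            simp only [PySem.List.remove?_eq_some_erase d1 x hx1,
              PySem.List.remove?_eq_some_erase d2 y hy2]
            have hperm1 : (d1.erase x).Perm s1' := (List.Perm.erase x hp1).trans (by simp)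
            have hperm2 : (d2.erase y).Perm s2' := (List.Perm.erase y hp2).trans (by simp)
            rw [ih (d1.erase x) (d2.erase y) s1' s2' (seconds - x - y) (songs + 2)
              hperm1 hperm2 (List.pairwise_cons.mp hs1).2 (List.pairwise_cons.mp hs2).2]
            by_cases hc : k > s1'.length ∨ k > s2'.length
            · have hc' : k + 1 > (x :: s1').length ∨ k + 1 > (y :: s2').length := by
                simp only [List.length_cons]; omega
              rw [if_pos hc, if_pos hc']
            · have hc' : ¬ (k + 1 > (x :: s1').length ∨ k + 1 > (y :: s2').length) := by
                simp only [List.length_cons]; omega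
              rw [if_neg hc, if_neg hc']
              have hcast : songs + 2 + 2 * (k : Int) = songs + 2 * ((k + 1 : Nat) : Int) := by
                push_cast; ring
              rw [hcast]

theorem toNat_if_pos (T : Int) : (if T > 0 then T else 0).toNat = T.toNat := by
  split <;> omega

-- ===== VERDICT (by name: the statement is the Claim_ definition above) =====
theorem listen_spec : Claim_equal_listen := by
  intro d1 d2 minutes T _
  unfold Spec_listen
  show _root_.listen d1 d2 minutes T = listen_alt d1 d2 minutes T
  unfold _root_.listen listen_alt
  rw [toNat_if_pos]
  exact (loop1_eq T.toNat d1 d2 (PySem.List.sorted d1 (fun x => x)) (PySem.List.sorted d2 (fun x => x))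
    (minutes * 60) 0
    (PySem.List.sorted_perm _ _ _).symm (PySem.List.sorted_perm _ _ _).symm
    (PySem.List.sorted_pairwise _ _) (PySem.List.sorted_pairwise _ _)).trans (by rw [zero_add])
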